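-- pv_equiv track=rewrite | github.com/Chrisyeu11/pythonhackerrank | Hackerrank/Algorithm/getMoneySpent.py | getMoneySpent
-- ===== SOURCE A (Python) =====
-- def getMoneySpent(keyboards, drives, b):
--     # Initialize the maximum spendable amount as -1 (indicating no valid combination was found)
--     max_spend = -1
--
--     # Iterate over each keyboard
--     for keyboard in keyboards:
--         # Iterate over each drive
--         for drive in drives:
--             # Calculate the total cost for this keyboard and drive combination
--             total_cost = keyboard + drive
--
--             # Check if this cost is within the budget and greater than the current max spend
--             if total_cost <= b and total_cost > max_spend:
--                 max_spend = total_cost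
--
--     # Return the maximum amount spent without exceeding the budget
--     return max_spend
-- ===== SOURCE B (Python) =====
-- def getMoneySpent(keyboards, drives, b):
--     # Sort drives once; for each keyboard binary-search the largest affordable drive.
--     ds = sorted(drives)
--     best = -1
--     for k in keyboards:
--         limit = b - k
--         # bisect_right(ds, limit) by hand (no imports in the original module)
--         lo, hi = 0, len(ds)
--         while lo < hi:
--             mid = (lo + hi) // 2
--             if limit < ds[mid]:
--                 hi = mid
--             else:
--                 lo = mid + 1
--         if lo > 0:
--             cand = k + ds[lo - 1]
--             if cand > best:
--                 best = cand
--     return best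
-- ===== Notes on version B (the rewrite author's own statement) =====
-- stated objective: faster
-- what changed: Replaces the nested scan over all keyboard/drive pairs by sorting the drives once and binary-searching, per keyboard, the largest drive that still fits the budget.
import Mathlib
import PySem

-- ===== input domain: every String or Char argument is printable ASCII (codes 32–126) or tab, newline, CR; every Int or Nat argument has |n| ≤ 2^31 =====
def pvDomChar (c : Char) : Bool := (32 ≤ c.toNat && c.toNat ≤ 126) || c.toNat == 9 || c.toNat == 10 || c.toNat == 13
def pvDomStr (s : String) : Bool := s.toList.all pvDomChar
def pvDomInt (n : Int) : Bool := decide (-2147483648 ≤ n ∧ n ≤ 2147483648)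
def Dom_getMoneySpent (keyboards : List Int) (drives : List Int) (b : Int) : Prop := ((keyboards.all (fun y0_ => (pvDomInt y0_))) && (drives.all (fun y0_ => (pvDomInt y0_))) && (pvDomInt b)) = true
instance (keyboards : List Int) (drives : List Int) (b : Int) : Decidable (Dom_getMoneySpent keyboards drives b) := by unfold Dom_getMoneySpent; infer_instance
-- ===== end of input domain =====

-- B sorts the drives once and binary-searches the largest affordable drive per keyboard
-- instead of A's scan over all keyboard/drive pairs (objective: faster, asymptotic).


-- ===== PORT A =====
def getMoneySpent (keyboards : List Int) (drives : List Int) (b : Int) : Int :=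
  keyboards.foldl (fun max_spend keyboard =>
    drives.foldl (fun max_spend drive =>
      let total_cost := keyboard + drive
      if total_cost ≤ b ∧ total_cost > max_spend then total_cost else max_spend)
      max_spend)
    (-1)

-- ===== PORT B =====
-- the hand-written bisect_right loop in Source B is exactly PySem.List.bisectRight's lo/hi loop
def getMoneySpent_alt (keyboards : List Int) (drives : List Int) (b : Int) : Int :=
  let ds := PySem.List.sorted drives (fun x => x) false
  keyboards.foldl (fun best k =>
    let lo := PySem.List.bisectRight ds (b - k)
    if lo > 0 then
      let cand := k + ds.getD (lo - 1) 0
      if cand > best then cand else best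
    else best)
    (-1)

-- ===== PRECONDITION & SPEC =====
def Spec_getMoneySpent (keyboards : List Int) (drives : List Int) (b : Int) (out : Int) : Prop := out = getMoneySpent_alt keyboards drives b
instance (keyboards : List Int) (drives : List Int) (b : Int) (out : Int) : Decidable (Spec_getMoneySpent keyboards drives b out) := by unfold Spec_getMoneySpent; infer_instance

-- ===== CLAIM (what is proved, stated in full; the proofs are below) =====
def Claim_equal_getMoneySpent : Prop := ∀ (keyboards : List Int) (drives : List Int) (b : Int), Dom_getMoneySpent keyboards drives b → Spec_getMoneySpent keyboards drives b (getMoneySpent keyboards drives b)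

-- ===== LEMMAS AND PROOFS =====

-- folding max m (k+d) over elements all ≤ the start value leaves it unchanged
theorem pv_foldl_max_absorb (k : Int) : ∀ (l : List Int) (m : Int), (∀ d ∈ l, k + d ≤ m) →
    l.foldl (fun m d => max m (k + d)) m = m := by
  intro l
  induction l with
  | nil => intro m _; rfl
  | cons d t ih =>
    intro m h
    have hd : k + d ≤ m := h d (by simp)
    simp only [List.foldl_cons, max_eq_left hd]
    exact ih m (fun d' hd' => h d' (by simp [hd']))

-- folding max m (k+d) over a list whose maximum is c gives max m (k+c)
theorem pv_foldl_max_of_max_mem (k c : Int) : ∀ (l : List Int) (m : Int),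
    (∀ d ∈ l, d ≤ c) → c ∈ l →
    l.foldl (fun m d => max m (k + d)) m = max m (k + c) := by
  intro l
  induction l with
  | nil => intro m _ hc; cases hc
  | cons d t ih =>
    intro m hle hc
    simp only [List.foldl_cons]
    by_cases hct : c ∈ t
    · rw [ih (max m (k + d)) (fun d' hd' => hle d' (by simp [hd'])) hct]
      have hdc : d ≤ c := hle d (by simp)
      rw [max_def, max_def, max_def]
      split_ifs <;> omega
    · have hdc : d = c := by
        rcases List.mem_cons.mp hc with h | h
        · exact h.symm
        · exact absurd h hct
      subst hdc
      exact pv_foldl_max_absorb k t (max m (k + d))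
        (fun d' hd' => le_trans (by have := hle d' (by simp [hd']); omega) (le_max_right _ _))

-- elements failing the guard are skipped
theorem pv_foldl_skip (k x : Int) : ∀ (l : List Int) (m : Int), (∀ d ∈ l, ¬ d ≤ x) →
    l.foldl (fun m d => if d ≤ x then max m (k + d) else m) m = m := by
  intro l
  induction l with
  | nil => intro m _; rfl
  | cons d t ih =>
    intro m h
    simp only [List.foldl_cons, if_neg (h d (by simp))]
    exact ih m (fun d' hd' => h d' (by simp [hd']))

-- on a sorted list the guarded max-fold is decided by bisectRight
theorem pv_sorted_fold (ds : List Int) (hs : ds.Pairwise (· ≤ ·)) (k x m : Int) :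
    ds.foldl (fun m d => if d ≤ x then max m (k + d) else m) m
    = if PySem.List.bisectRight ds x > 0
      then max m (k + ds.getD (PySem.List.bisectRight ds x - 1) 0)
      else m := by
  obtain ⟨hlen, hle, hgt⟩ := PySem.List.bisectRight_spec ds x hs
  set n := PySem.List.bisectRight ds x with hn
  by_cases h0 : n > 0
  · rw [if_pos h0]
    have hn1 : n - 1 < ds.length := by omega
    have hgetd : ds.getD (n - 1) 0 = ds[n - 1] := List.getD_eq_getElem ds 0 hn1
    rw [hgetd]
    -- split ds into the affordable prefix and the rest
    conv_lhs => rw [← List.take_append_drop n ds]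
    rw [List.foldl_append]
    have htake_le : ∀ d ∈ ds.take n, d ≤ x := by
      intro d hd
      rw [List.mem_take_iff_getElem] at hd
      obtain ⟨i, hi, rfl⟩ := hd
      exact hle i (by omega) (by omega)
    have htake_lec : ∀ d ∈ ds.take n, d ≤ ds[n - 1] := by
      intro d hd
      rw [List.mem_take_iff_getElem] at hd
      obtain ⟨i, hi, rfl⟩ := hd
      rcases Nat.lt_or_ge i (n - 1) with h | h
      · exact List.pairwise_iff_getElem.mp hs i (n - 1) _ _ h
      · have : i = n - 1 := by omega
        subst this; rfl
    have hcmem : ds[n - 1] ∈ ds.take n := by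
      rw [List.mem_take_iff_getElem]
      exact ⟨n - 1, by omega, rfl⟩
    rw [PySem.List.foldl_congr_mem (ds.take n) _ (fun m d => max m (k + d)) m
        (fun acc d hd => by rw [if_pos (htake_le d hd)])]
    rw [pv_foldl_max_of_max_mem k ds[n - 1] (ds.take n) m htake_lec hcmem]
    apply pv_foldl_skip
    intro d hd
    rw [List.mem_drop_iff_getElem] at hd
    obtain ⟨i, hi, rfl⟩ := hd
    have := hgt (n + i) (by omega) (by omega)
    omega
  · rw [if_neg h0]
    apply pv_foldl_skip
    intro d hd
    obtain ⟨i, hi, rfl⟩ := List.mem_iff_getElem.mp hd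
    have := hgt i hi (by omega)
    omega

-- A's inner scan over all drives equals B's binary-search step, for every accumulator
theorem pv_inner_eq (drives : List Int) (b k m : Int) :
    drives.foldl (fun max_spend drive =>
      let total_cost := k + drive
      if total_cost ≤ b ∧ total_cost > max_spend then total_cost else max_spend) m
    = (let ds := PySem.List.sorted drives (fun x => x) false
       let lo := PySem.List.bisectRight ds (b - k)
       if lo > 0 then
         let cand := k + ds.getD (lo - 1) 0
         if cand > m then cand else m
       else m) := by
  have hstep : (fun (max_spend drive : Int) =>
      let total_cost := k + drive
      if total_cost ≤ b ∧ total_cost > max_spend then total_cost else max_spend)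
      = fun (m d : Int) => if d ≤ b - k then max m (k + d) else m := by
    funext m d
    simp only [max_def]
    split_ifs <;> omega
  rw [hstep]
  have hperm : drives.Perm (PySem.List.sorted drives (fun x => x) false) :=
    (PySem.List.sorted_perm drives (fun x => x) false).symm
  have hcomm : ∀ a ∈ drives, ∀ c ∈ drives, ∀ z : Int,
      (fun (m d : Int) => if d ≤ b - k then max m (k + d) else m)
        ((fun (m d : Int) => if d ≤ b - k then max m (k + d) else m) z a) c
      = (fun (m d : Int) => if d ≤ b - k then max m (k + d) else m)
        ((fun (m d : Int) => if d ≤ b - k then max m (k + d) else m) z c) a := by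
    intro a _ c _ z
    simp only [max_def]
    split_ifs <;> omega
  rw [List.Perm.foldl_eq' hperm hcomm m]
  have hs : (PySem.List.sorted drives (fun x => x) false).Pairwise (· ≤ ·) :=
    PySem.List.sorted_pairwise drives (fun x => x)
  rw [pv_sorted_fold _ hs k (b - k) m]
  simp only []
  split_ifs with h1 h2
  · rw [max_def]; split_ifs <;> omega
  · rw [max_def]; split_ifs <;> omega
  · rfl

-- ===== VERDICT (by name: the statement is the Claim_ definition above) =====
theorem getMoneySpent_spec : Claim_equal_getMoneySpent := by
  intro keyboards drives b _
  unfold Spec_getMoneySpent getMoneySpent getMoneySpent_alt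
  simp only []
  have h : (fun (max_spend keyboard : Int) =>
      drives.foldl (fun max_spend drive =>
        let total_cost := keyboard + drive
        if total_cost ≤ b ∧ total_cost > max_spend then total_cost else max_spend)
        max_spend)
      = fun (best k : Int) =>
        (let ds := PySem.List.sorted drives (fun x => x) false
         let lo := PySem.List.bisectRight ds (b - k)
         if lo > 0 then
           let cand := k + ds.getD (lo - 1) 0
           if cand > best then cand else best
         else best) := by
    funext m k
    exact pv_inner_eq drives b k m
  rw [h]
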